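-- pv_equiv track=rewrite | github.com/Abbiirr/lowrescoder | autocode/src/autocode/app/commands.py | _prioritize_models
-- ===== SOURCE A (Python) =====
-- _GATEWAY_DISPLAY_LIMIT = 20
--
-- _GATEWAY_PRIORITY_NAMES = frozenset(
--     {
--         "coding",
--         "tools",
--         "terminal_bench",
--         "reasoning",
--         "fast",
--         "smart",
--         "default",
--         "chat",
--     }
-- )
--
-- def _prioritize_models(models: list[str], current_model: str) -> tuple[list[str], int]:
--     """Sort models: current first, known aliases next, then alphabetical.
--
--     Returns (displayed_list, remaining_count).
--     If the catalog exceeds _GATEWAY_DISPLAY_LIMIT, truncate and report remainder.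
--     """
--     if len(models) <= _GATEWAY_DISPLAY_LIMIT:
--         return _sort_models(models, current_model), 0
--
--     priority: list[str] = []
--     rest: list[str] = []
--     for m in models:
--         if m == current_model or m in _GATEWAY_PRIORITY_NAMES:
--             priority.append(m)
--         else:
--             rest.append(m)
--
--     priority_sorted = _sort_models(priority, current_model)
--     remaining_slots = _GATEWAY_DISPLAY_LIMIT - len(priority_sorted)
--     if remaining_slots <= 0:
--         return priority_sorted[:_GATEWAY_DISPLAY_LIMIT], len(models) - _GATEWAY_DISPLAY_LIMIT
--
--     displayed = priority_sorted + sorted(rest)[:remaining_slots]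
--     remaining = len(models) - len(displayed)
--     return displayed, remaining
--
-- def _sort_models(models: list[str], current_model: str) -> list[str]:
--     """Sort: current model first, then known aliases, then alphabetical."""
--
--     def _key(m: str) -> tuple[int, str]:
--         if m == current_model:
--             return (0, m)
--         if m in _GATEWAY_PRIORITY_NAMES:
--             return (1, m)
--         return (2, m)
--
--     return sorted(models, key=_key)
-- ===== SOURCE B (Python) =====
-- _GATEWAY_DISPLAY_LIMIT = 20
--
-- _GATEWAY_PRIORITY_NAMES = frozenset(
--     {
--         "coding",
--         "tools",
--         "terminal_bench",
--         "reasoning",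
--         "fast",
--         "smart",
--         "default",
--         "chat",
--     }
-- )
--
--
-- def _sort_models(models: list[str], current_model: str) -> list[str]:
--     """Sort: current model first, then known aliases, then alphabetical."""
--
--     def _key(m: str) -> tuple[int, str]:
--         if m == current_model:
--             return (0, m)
--         if m in _GATEWAY_PRIORITY_NAMES:
--             return (1, m)
--         return (2, m)
--
--     return sorted(models, key=_key)
--
--
-- def _prioritize_models(models: list[str], current_model: str) -> tuple[list[str], int]:
--     """Sort once with _sort_models and truncate to the display limit.
--
--     The priority/rest partition of the original is unnecessary: in the
--     full stable key-sort the priority entries come first and the rest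
--     follow alphabetically, so slicing the full sort gives the same list.
--     """
--     full = _sort_models(models, current_model)
--     if len(models) <= _GATEWAY_DISPLAY_LIMIT:
--         return full, 0
--     return full[:_GATEWAY_DISPLAY_LIMIT], len(models) - _GATEWAY_DISPLAY_LIMIT
-- ===== Notes on version B (the rewrite author's own statement) =====
-- stated objective: simpler
-- what changed: B sorts the whole list once with _sort_models and slices to the display limit, eliminating A's manual priority/rest partition, the second sort, and the remaining_slots bookkeeping; the stable key-sort already places priority entries first and the rest alphabetically.
import Mathlib
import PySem

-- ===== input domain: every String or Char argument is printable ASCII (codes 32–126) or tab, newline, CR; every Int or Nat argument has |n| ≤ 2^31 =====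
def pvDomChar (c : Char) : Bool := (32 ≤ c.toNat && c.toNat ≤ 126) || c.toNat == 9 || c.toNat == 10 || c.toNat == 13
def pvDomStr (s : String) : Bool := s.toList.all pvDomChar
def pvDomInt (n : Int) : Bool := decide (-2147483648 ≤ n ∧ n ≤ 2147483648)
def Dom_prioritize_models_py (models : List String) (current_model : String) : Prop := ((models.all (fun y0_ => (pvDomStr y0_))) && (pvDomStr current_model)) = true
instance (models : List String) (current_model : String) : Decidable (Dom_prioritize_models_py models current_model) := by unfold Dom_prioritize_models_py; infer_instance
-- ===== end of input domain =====

-- B sorts once with _sort_models and truncates, replacing A's priority/rest partition,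
-- second sort and remaining_slots bookkeeping (objective: simpler; return value only).

-- ===== PORT A =====
def gatewayPriorityNames : List String :=
  ["coding", "tools", "terminal_bench", "reasoning", "fast", "smart", "default", "chat"]

-- key index of _sort_models' _key (the tuple key is (sortRank cur m, m), ported via sorted2)
def sortRank (current_model : String) (m : String) : Int :=
  if m = current_model then 0 else if gatewayPriorityNames.contains m then 1 else 2

-- _sort_models: sorted(models, key=_key), key = (rank, m)
def sortModels (models : List String) (current_model : String) : List String :=
  PySem.List.sorted2 models (sortRank current_model) (fun m => m)

def prioritize_models_py (models : List String) (current_model : String) : List String × Int :=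
  if (models.length : Int) ≤ 20 then
    (sortModels models current_model, 0)
  else
    -- for m in models: append to priority or rest
    let pr := models.foldl
      (fun (acc : List String × List String) m =>
        if m = current_model ∨ gatewayPriorityNames.contains m = true then
          (acc.1 ++ [m], acc.2)
        else (acc.1, acc.2 ++ [m]))
      ([], [])
    let priority_sorted := sortModels pr.1 current_model
    let remaining_slots : Int := 20 - (priority_sorted.length : Int)
    if remaining_slots ≤ 0 then
      (PySem.List.slice priority_sorted none (some 20), (models.length : Int) - 20)
    else
      let displayed := priority_sorted ++
        PySem.List.slice (PySem.List.sorted pr.2 (fun m => m)) none (some remaining_slots)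
      (displayed, (models.length : Int) - (displayed.length : Int))

-- ===== PORT B =====
def prioritize_models_py_alt (models : List String) (current_model : String) : List String × Int :=
  let full := sortModels models current_model
  if (models.length : Int) ≤ 20 then (full, 0)
  else (PySem.List.slice full none (some 20), (models.length : Int) - 20)

-- ===== PRECONDITION & SPEC =====
def Spec_prioritize_models_py (models : List String) (current_model : String) (out : List String × Int) : Prop := out = prioritize_models_py_alt models current_model
instance (models : List String) (current_model : String) (out : List String × Int) : Decidable (Spec_prioritize_models_py models current_model out) := by unfold Spec_prioritize_models_py; infer_instance

-- ===== CLAIM (what is proved, stated in full; the proofs are below) =====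
def Claim_equal_prioritize_models_py : Prop := ∀ (models : List String) (current_model : String), Dom_prioritize_models_py models current_model → Spec_prioritize_models_py models current_model (prioritize_models_py models current_model)

-- ===== LEMMAS AND PROOFS =====

-- the Boolean partition test of A's loop
def prioTest (current_model : String) (m : String) : Bool :=
  decide (m = current_model ∨ gatewayPriorityNames.contains m = true)

theorem rank_le_one_of_test {cur m : String} (h : prioTest cur m = true) :
    sortRank cur m ≤ 1 := by
  unfold prioTest at h; unfold sortRank
  split_ifs with h1 h2
  · omega
  · omega
  · exact absurd (of_decide_eq_true h) (fun hc => hc.elim h1 h2)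

theorem rank_eq_two_of_not_test {cur m : String} (h : prioTest cur m = false) :
    sortRank cur m = 2 := by
  unfold prioTest at h
  simp only [decide_eq_false_iff_not, not_or] at h
  rw [sortRank, if_neg h.1, if_neg h.2]

theorem insertBy_append_of_before {α : Type} (bef : α → α → Bool) (x : α)
    (A R : List α) (h : ∀ r ∈ R, bef x r = true) :
    PySem.List.insertBy bef x (A ++ R) = PySem.List.insertBy bef x A ++ R := by
  induction A with
  | nil =>
    cases R with
    | nil => rfl
    | cons r R' => simp [PySem.List.insertBy, h r (by simp)]
  | cons a A' ih =>
    simp only [List.cons_append, PySem.List.insertBy]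
    split <;> simp [ih]

theorem insertBy_append_of_not {α : Type} (bef : α → α → Bool) (x : α)
    (A R : List α) (h : ∀ a ∈ A, bef x a = false) :
    PySem.List.insertBy bef x (A ++ R) = A ++ PySem.List.insertBy bef x R := by
  induction A with
  | nil => rfl
  | cons a A' ih =>
    simp only [List.cons_append, PySem.List.insertBy, h a (by simp)]
    simp only [Bool.false_eq_true, if_false]
    rw [ih (fun a ha => h a (by simp [ha]))]

theorem insertBy_congr {α : Type} (bef bef' : α → α → Bool) (x : α)
    (ys : List α) (h : ∀ y ∈ ys, bef x y = bef' x y) :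
    PySem.List.insertBy bef x ys = PySem.List.insertBy bef' x ys := by
  induction ys with
  | nil => rfl
  | cons y ys' ih =>
    simp only [PySem.List.insertBy, h y (by simp)]
    split
    · rfl
    · rw [ih (fun y hy => h y (by simp [hy]))]

-- the comparison sorted2 uses for _sort_models' key
def sortBef (cur : String) (a b : String) : Bool :=
  decide (sortRank cur a < sortRank cur b) ||
    (!decide (sortRank cur b < sortRank cur a) && decide (a < b))

theorem sortModels_eq_foldl (models : List String) (cur : String) :
    sortModels models cur =
      models.foldl (fun acc x => PySem.List.insertBy (sortBef cur) x acc) [] := rfl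

theorem sorted_id_eq_foldl (xs : List String) :
    PySem.List.sorted xs (fun m => m) =
      xs.foldl (fun acc x => PySem.List.insertBy (fun a b => decide (a < b)) x acc) [] := rfl

theorem mem_sortModels {models : List String} {cur x : String}
    (h : x ∈ sortModels models cur) : x ∈ models :=
  (PySem.List.sorted2_perm (xs := models) (k1 := sortRank cur) (k2 := fun m => m)
    (rev := false)).mem_iff.mp h

-- stable key-sort = sorted priority group ++ alphabetically sorted rest
theorem sort_split (cur : String) (models : List String) :
    sortModels models cur =
      sortModels (models.filter (prioTest cur)) cur ++
        PySem.List.sorted (models.filter (fun m => !prioTest cur m)) (fun m => m) := by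
  induction models using List.reverseRecOn with
  | nil => rfl
  | append_singleton xs x ih =>
    rw [sortModels_eq_foldl, List.foldl_append, ← sortModels_eq_foldl, ih]
    simp only [List.foldl_cons, List.foldl_nil, List.filter_append, List.filter_singleton]
    by_cases hx : prioTest cur x = true
    · simp only [hx, Bool.not_true, cond_true, cond_false, List.append_nil]
      rw [sortModels_eq_foldl (xs.filter (prioTest cur) ++ [x]), List.foldl_append,
        ← sortModels_eq_foldl]
      simp only [List.foldl_cons, List.foldl_nil]
      apply insertBy_append_of_before
      intro r hr
      have hrt : prioTest cur r = false := by
        have hr' := (PySem.List.mem_sorted (xs := xs.filter (fun m => !prioTest cur m))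
          (key := fun m => m) (rev := false) (x := r)).mp hr
        simpa using List.of_mem_filter hr'
      have h1 : sortRank cur x ≤ 1 := rank_le_one_of_test hx
      have h2 : sortRank cur r = 2 := rank_eq_two_of_not_test hrt
      unfold sortBef
      simp only [h2, Bool.or_eq_true, decide_eq_true_eq]
      left; omega
    · replace hx : prioTest cur x = false := by simpa using hx
      simp only [hx, Bool.not_false, cond_true, cond_false, List.append_nil]
      rw [sorted_id_eq_foldl (xs.filter (fun m => !prioTest cur m) ++ [x]), List.foldl_append,
        ← sorted_id_eq_foldl]
      simp only [List.foldl_cons, List.foldl_nil]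
      rw [insertBy_append_of_not]
      · congr 1
        apply insertBy_congr
        intro y hy
        have hyt : prioTest cur y = false := by
          have hy' := (PySem.List.mem_sorted (xs := xs.filter (fun m => !prioTest cur m))
            (key := fun m => m) (rev := false) (x := y)).mp hy
          simpa using List.of_mem_filter hy'
        have h2 : sortRank cur x = 2 := rank_eq_two_of_not_test hx
        have h2' : sortRank cur y = 2 := rank_eq_two_of_not_test hyt
        unfold sortBef
        simp [h2, h2']
      · intro a ha
        have hat : prioTest cur a = true := List.of_mem_filter (mem_sortModels ha)
        have h1 : sortRank cur a ≤ 1 := rank_le_one_of_test hat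
        have h2 : sortRank cur x = 2 := rank_eq_two_of_not_test hx
        unfold sortBef
        rw [decide_eq_false (show ¬ sortRank cur x < sortRank cur a by omega),
          decide_eq_true (show sortRank cur a < sortRank cur x by omega)]
        simp

theorem length_sortModels (models : List String) (cur : String) :
    (sortModels models cur).length = models.length :=
  (PySem.List.sorted2_perm (xs := models) (k1 := sortRank cur) (k2 := fun m => m)
    (rev := false)).length_eq

-- A's partition loop produces exactly the two filters
theorem partition_foldl (cur : String) (l : List String) (a b : List String) :
    l.foldl
      (fun (acc : List String × List String) m =>
        if m = cur ∨ gatewayPriorityNames.contains m = true then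
          (acc.1 ++ [m], acc.2)
        else (acc.1, acc.2 ++ [m]))
      (a, b) =
      (a ++ l.filter (prioTest cur), b ++ l.filter (fun m => !prioTest cur m)) := by
  induction l generalizing a b with
  | nil => simp
  | cons m ms ih =>
    simp only [List.foldl_cons, List.filter_cons]
    by_cases hm : m = cur ∨ gatewayPriorityNames.contains m = true
    · have ht : prioTest cur m = true := decide_eq_true hm
      rw [if_pos hm, ih]
      simp [ht]
    · have ht : prioTest cur m = false := decide_eq_false hm
      rw [if_neg hm, ih]
      simp [ht]

theorem main_equiv (models : List String) (cur : String) :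
    prioritize_models_py models cur = prioritize_models_py_alt models cur := by
  unfold prioritize_models_py prioritize_models_py_alt
  by_cases hle : (models.length : Int) ≤ 20
  · simp [hle]
  · simp only [hle, if_false]
    have hlen : 20 < models.length := by exact_mod_cast not_le.mp hle
    rw [partition_foldl cur models [] []]
    simp only [List.nil_append]
    rw [sort_split cur models]
    set P := sortModels (models.filter (prioTest cur)) cur with hP
    set R := PySem.List.sorted (models.filter (fun m => !prioTest cur m)) (fun m => m) with hR
    have hPlen : P.length = (models.filter (prioTest cur)).length :=
      length_sortModels _ _
    have hRlen : R.length = (models.filter (fun m => !prioTest cur m)).length :=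
      PySem.List.length_sorted _ _ _
    have hsum : P.length + R.length = models.length := by
      rw [hPlen, hRlen]
      exact (List.length_eq_length_filter_add (prioTest cur)).symm
    have h20 : (20 : Int) = ((20 : Nat) : Int) := rfl
    by_cases hs : (20 : Int) - (P.length : Int) ≤ 0
    · have hge : 20 ≤ P.length := by omega
      rw [if_pos hs]
      rw [h20, PySem.List.slice_to_natCast, PySem.List.slice_to_natCast]
      rw [List.take_append]
      have h0 : 20 - P.length = 0 := by omega
      rw [h0]
      simp
    · have hlt : P.length < 20 := by omega
      rw [if_neg hs]
      have hcast : (20 : Int) - (P.length : Int) = ((20 - P.length : Nat) : Int) := by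
        omega
      rw [hcast, PySem.List.slice_to_natCast, h20, PySem.List.slice_to_natCast]
      rw [List.take_append, List.take_of_length_le (le_of_lt hlt)]
      have hRge : 20 - P.length ≤ R.length := by omega
      have hdlen : (P ++ List.take (20 - P.length) R).length = 20 := by
        simp only [List.length_append, List.length_take]
        omega
      rw [hdlen]

-- ===== VERDICT (by name: the statement is the Claim_ definition above) =====
theorem prioritize_models_py_spec : Claim_equal_prioritize_models_py := by
  intro models cur _
  unfold Spec_prioritize_models_py
  exact main_equiv models cur
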